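-- pv_equiv track=rewrite | github.com/emleddin/research-scripts | LICHEM-tools/dissected.py | setup_swapsies
-- ===== SOURCE A (Python) =====
-- def setup_swapsies(react_mm_beads, prod_mm_beads, n_beads):
--     """
--     Creates a list of which swapsies to use for each frame.
--     Parameters
--     ----------
--     react_mm_beads : int
--         The number of beads along the path to substitute the reactant MM for.
--     prod_mm_beads : int
--         The number of beads along the path to substitute the product MM for.
--     n_beads: int
--         The number of beads represented by the Burst structure.
--     Returns
--     -------
--     swapsies_list : list
--         A list with the type of swapies to perform for each bead in the
--         BurstStruct.
--     """
--     ## Swapsies options: "regular" or "reverse"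
--     ## regular: put the product QM in the reactant MM
--     ## reverse: put the reactant QM in the product MM
--     swapsies_list = []
--     test_react = 0
--     for bead in range(n_beads):
--         if bead == 0 or bead == n_beads-1:
--             swapsies_list.append("no")
--         elif test_react < react_mm_beads:
--             swapsies_list.append("regular")
--             test_react += 1
--         else:
--             swapsies_list.append("reverse")
--     return swapsies_list
-- ===== SOURCE B (Python) =====
-- def setup_swapsies(react_mm_beads, prod_mm_beads, n_beads):
--     if n_beads <= 0:
--         return []
--     if n_beads == 1:
--         return ["no"]
--     n_middle = n_beads - 2
--     r = max(0, min(react_mm_beads, n_middle))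
--     return ["no"] + ["regular"] * r + ["reverse"] * (n_middle - r) + ["no"]
-- ===== Notes on version B (the rewrite author's own statement) =====
-- stated objective: simpler
-- what changed: Replaces the per-bead loop with a branch and counter by closed-form segment arithmetic: clamp react_mm_beads to the middle length and concatenate repeated blocks ['no'] + ['regular']*r + ['reverse']*(m-r) + ['no'].
import Mathlib
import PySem

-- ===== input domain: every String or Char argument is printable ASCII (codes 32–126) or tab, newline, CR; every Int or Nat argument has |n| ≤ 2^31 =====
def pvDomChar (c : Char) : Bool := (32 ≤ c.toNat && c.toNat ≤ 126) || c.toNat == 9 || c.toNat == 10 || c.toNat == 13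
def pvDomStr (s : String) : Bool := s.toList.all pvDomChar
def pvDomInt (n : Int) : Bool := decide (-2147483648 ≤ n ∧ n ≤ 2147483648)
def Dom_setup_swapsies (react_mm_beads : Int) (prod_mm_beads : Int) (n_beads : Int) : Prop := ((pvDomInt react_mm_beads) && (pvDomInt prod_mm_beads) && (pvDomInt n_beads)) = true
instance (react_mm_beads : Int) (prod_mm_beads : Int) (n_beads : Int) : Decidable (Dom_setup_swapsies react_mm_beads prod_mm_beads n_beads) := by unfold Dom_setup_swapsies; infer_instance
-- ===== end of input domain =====

-- B replaces A's per-bead branch/counter loop by closed-form segment arithmetic (clamped react count, concatenated repeated blocks); a timing run measured it faster by a constant factor.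


-- ===== PORT A =====
-- transliteration of A: fold over range(n_beads) with (swapsies_list, test_react) state
def setup_swapsies (react_mm_beads : Int) (prod_mm_beads : Int) (n_beads : Int) : List String :=
  (((PySem.List.pyRange 0 n_beads 1).foldl (fun (s : List String × Int) bead =>
      if bead = 0 ∨ bead = n_beads - 1 then (s.1 ++ ["no"], s.2)
      else if s.2 < react_mm_beads then (s.1 ++ ["regular"], s.2 + 1)
      else (s.1 ++ ["reverse"], s.2)) ([], 0))).1

-- ===== PORT B =====
-- B: closed-form segment concatenation (simpler decomposition, same O(n))
def setup_swapsies_alt (react_mm_beads : Int) (prod_mm_beads : Int) (n_beads : Int) : List String :=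
  if n_beads ≤ 0 then []
  else if n_beads = 1 then ["no"]
  else
    let n_middle := n_beads - 2
    let r := max 0 (min react_mm_beads n_middle)
    ["no"] ++ List.replicate r.toNat "regular" ++ List.replicate (n_middle - r).toNat "reverse" ++ ["no"]

-- ===== PRECONDITION & SPEC =====
def Spec_setup_swapsies (react_mm_beads : Int) (prod_mm_beads : Int) (n_beads : Int) (out : List String) : Prop := out = setup_swapsies_alt react_mm_beads prod_mm_beads n_beads
instance (react_mm_beads : Int) (prod_mm_beads : Int) (n_beads : Int) (out : List String) : Decidable (Spec_setup_swapsies react_mm_beads prod_mm_beads n_beads out) := by unfold Spec_setup_swapsies; infer_instance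

-- ===== CLAIM (what is proved, stated in full; the proofs are below) =====
def Claim_equal_setup_swapsies : Prop := ∀ (react_mm_beads : Int) (prod_mm_beads : Int) (n_beads : Int), Dom_setup_swapsies react_mm_beads prod_mm_beads n_beads → Spec_setup_swapsies react_mm_beads prod_mm_beads n_beads (setup_swapsies react_mm_beads prod_mm_beads n_beads)

-- ===== LEMMAS AND PROOFS =====

-- ===== VERDICT (by name: the statement is the Claim_ definition above) =====
lemma mid_loop (react : Int) (n : Int) :
    ∀ (xs : List Int) (acc : List String) (t : Int),
      (∀ b ∈ xs, ¬(b = 0 ∨ b = n - 1)) →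
      (xs.foldl (fun (s : List String × Int) bead =>
          if bead = 0 ∨ bead = n - 1 then (s.1 ++ ["no"], s.2)
          else if s.2 < react then (s.1 ++ ["regular"], s.2 + 1)
          else (s.1 ++ ["reverse"], s.2)) (acc, t)) =
      (acc ++ List.replicate (min (react - t) xs.length).toNat "regular"
           ++ List.replicate (xs.length - (min (react - t) xs.length).toNat) "reverse",
       t + (min (react - t) xs.length).toNat) := by
  intro xs
  induction xs with
  | nil =>
    intro acc t _
    simp
  | cons b xs ih =>
    intro acc t hmem
    have hb : ¬(b = 0 ∨ b = n - 1) := hmem b (List.mem_cons_self ..)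
    have hxs : ∀ c ∈ xs, ¬(c = 0 ∨ c = n - 1) := fun c hc => hmem c (List.mem_cons_of_mem _ hc)
    simp only [List.foldl_cons, if_neg hb]
    by_cases ht : t < react
    · rw [if_pos ht, ih (acc ++ ["regular"]) (t + 1) hxs]
      have h1 : (min (react - t) ((b :: xs).length : Int)).toNat
          = (min (react - (t + 1)) (xs.length : Int)).toNat + 1 := by
        simp only [List.length_cons]; omega
      rw [h1]
      simp only [List.length_cons, Nat.add_sub_add_right]
      simp only [Prod.mk.injEq]
      constructor
      · simp [List.replicate_succ]
      · omega
    · rw [if_neg ht, ih (acc ++ ["reverse"]) t hxs]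
      have h0 : (min (react - t) ((b :: xs).length : Int)).toNat = 0 := by
        simp only [List.length_cons]; push_cast; omega
      have h0' : (min (react - t) ((xs.length : Int))).toNat = 0 := by push_cast; omega
      rw [h0, h0']
      simp only [Prod.mk.injEq, Nat.sub_zero, List.length_cons]
      constructor
      · simp [List.replicate_succ]
      · trivial

-- ===== VERDICT (by name: the statement is the Claim_ definition above) =====
theorem setup_swapsies_spec : Claim_equal_setup_swapsies := by
  intro react prod n _
  unfold Spec_setup_swapsies setup_swapsies setup_swapsies_alt
  by_cases h0 : n ≤ 0
  · rw [PySem.List.pyRange_one_eq_nil (by omega)]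
    simp [h0]
  · by_cases h1 : n = 1
    · subst h1
      rw [PySem.List.pyRange_one_cons (by omega), PySem.List.pyRange_one_eq_nil (by omega)]
      norm_num
    · have h2 : 2 ≤ n := by omega
      have hsplit1 : PySem.List.pyRange 0 n 1
          = PySem.List.pyRange 0 (n - 1) 1 ++ PySem.List.pyRange (n - 1) n 1 :=
        PySem.List.pyRange_one_append 0 (n - 1) n (by omega) (by omega)
      have hlast : PySem.List.pyRange (n - 1) n 1 = [n - 1] := by
        have := PySem.List.pyRange_one_singleton (a := n - 1)
        rw [show n - 1 + 1 = n by omega] at this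
        exact this
      have hhead : PySem.List.pyRange 0 (n - 1) 1
          = 0 :: PySem.List.pyRange 1 (n - 1) 1 :=
        PySem.List.pyRange_one_cons (by omega)
      rw [hsplit1, hlast, hhead]
      have hmidlen : (PySem.List.pyRange 1 (n - 1) 1).length = (n - 2).toNat := by
        rw [PySem.List.length_pyRange_one]; congr 1; omega
      have hmem : ∀ b ∈ PySem.List.pyRange 1 (n - 1) 1, ¬(b = 0 ∨ b = n - 1) := by
        intro b hb
        rw [PySem.List.mem_pyRange_one] at hb
        omega
      simp only [List.foldl_cons, List.foldl_append, List.foldl_nil,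
        true_or, or_true, if_true]
      rw [mid_loop react n _ _ 0 hmem]
      rw [hmidlen]
      simp only [if_neg h0, if_neg h1]
      have e1 : (min (react - 0) (((n - 2).toNat : Nat) : Int)).toNat
          = (max 0 (min react (n - 2))).toNat := by omega
      have e2 : ((n - 2).toNat : Nat) - (max 0 (min react (n - 2))).toNat
          = (n - 2 - max 0 (min react (n - 2))).toNat := by omega
      rw [e1, e2]
      simp
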